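-- pv_equiv track=rewrite | github.com/Ounaye/TAL_ApprentissageComposition_NADJ | code_1&2/makeEmbeding.py | processBigDataOutOfTog
-- ===== SOURCE A (Python) =====
-- def processBigDataOutOfTog(rawText):
--     for line in rawText:
--         indexWord = 0
--         for word in line:
--             findComposite = 0
--             for letter in word:
--                 if(letter == "-"):
--                     findComposite +=1
--             if(findComposite == 2):
--                 n1Word = word.split("-")[0]
--                 prepWord = word.split("-")[1]
--                 n2Word = word.split("-")[2]
--                 line[indexWord] = n1Word
--                 line.insert(indexWord+1, prepWord)
--                 line.insert(indexWord+2,n2Word)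
--                 findComposite = 0
--             indexWord +=1
--     return rawText
-- ===== SOURCE B (Python) =====
-- def processBigDataOutOfTog(rawText):
--     # Single accumulator pass per line (A mutates each line while iterating it;
--     # B rebuilds the line and writes it back in place with line[:] = newline).
--     for line in rawText:
--         newline = []
--         for word in line:
--             if word.count('-') == 2:
--                 newline.extend(word.split('-'))
--             else:
--                 newline.append(word)
--         line[:] = newline
--     return rawText
-- ===== Notes on version B (the rewrite author's own statement) =====
-- stated objective: simpler
-- what changed: Replaces A's mutate-while-iterating scheme (insert into the line being looped over, with a manually tracked index) by a single accumulator pass that appends each word, or its three split parts when it contains exactly two hyphens, then writes the new list back in place.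
import Mathlib
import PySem

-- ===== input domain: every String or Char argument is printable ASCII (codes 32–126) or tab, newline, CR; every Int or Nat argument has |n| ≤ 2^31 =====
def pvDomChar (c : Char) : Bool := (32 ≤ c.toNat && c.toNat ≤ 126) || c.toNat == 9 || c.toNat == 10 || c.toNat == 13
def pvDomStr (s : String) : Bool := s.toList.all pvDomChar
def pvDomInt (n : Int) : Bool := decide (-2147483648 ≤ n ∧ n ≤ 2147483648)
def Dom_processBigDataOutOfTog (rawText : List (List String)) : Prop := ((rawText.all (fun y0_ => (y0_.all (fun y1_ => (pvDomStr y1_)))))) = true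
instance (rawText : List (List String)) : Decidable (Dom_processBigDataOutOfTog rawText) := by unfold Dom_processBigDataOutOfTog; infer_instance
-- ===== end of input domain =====

-- B replaces A's insert-into-the-line-being-iterated scheme by one accumulator pass per line
-- (simpler); both Pythons mutate the lines of rawText in place — the theorems are about the
-- (identical) return value.

-- ===== PORT A =====
-- A's inner letter loop: count of '-' in word (Python int accumulator).
def hyphens (w : String) : Int :=
  w.toList.foldl (fun n letter => if letter == '-' then n + 1 else n) 0

-- Proof-side model of splitting on a single character (used by loopA's termination proof,
-- cited there by name, and by the equivalence lemmas below).
def parts1 (c : Char) : List Char → List Char → List (List Char)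
  | pre, [] => [pre]
  | pre, x :: r => if x = c then pre :: parts1 c [] r else parts1 c (pre ++ [x]) r

lemma splitOn_go_single (c : Char) : ∀ (l : List Char) (fuel : Nat) (cur : List Char)
    (acc : List (List Char)), l.length ≤ fuel →
    PySem.Chars.splitOn.go [c] fuel l cur acc = acc.reverse ++ parts1 c cur.reverse l := by
  intro l
  induction l with
  | nil => intro fuel cur acc h; cases fuel <;> simp [PySem.Chars.splitOn.go, parts1]
  | cons x r ih =>
      intro fuel cur acc h
      cases fuel with
      | zero => simp at h
      | succ f =>
          by_cases hx : x = c
          · subst hx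
            simp only [PySem.Chars.splitOn.go, List.isPrefixOf, BEq.rfl, Bool.true_and,
              if_true, List.length_cons, List.drop_succ_cons,
              List.length_nil, List.drop_zero]
            rw [ih f [] (cur.reverse :: acc) (by simpa using h)]
            simp [parts1]
          · have hpre : [c].isPrefixOf (x :: r) = false := by
              simp [List.isPrefixOf]; exact fun h' => absurd h'.symm hx
            simp only [PySem.Chars.splitOn.go, hpre]
            rw [ih f (x :: cur) acc (by simpa using h)]
            simp [parts1, hx]

lemma splitOn_single (c : Char) (l : List Char) :
    PySem.Chars.splitOn l [c] = parts1 c [] l := by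
  have := splitOn_go_single c l (l.length + 1) [] [] (by omega)
  simpa [PySem.Chars.splitOn] using this

lemma parts1_length (c : Char) : ∀ (l pre : List Char),
    (parts1 c pre l).length = l.count c + 1 := by
  intro l
  induction l with
  | nil => intro pre; simp [parts1]
  | cons x r ih =>
      intro pre
      by_cases hx : x = c <;> simp [parts1, hx, ih]

lemma parts1_count (c : Char) : ∀ (l pre : List Char), pre.count c = 0 →
    ∀ p ∈ parts1 c pre l, p.count c = 0 := by
  intro l
  induction l with
  | nil => intro pre hpre p hp; simp [parts1] at hp; simpa [hp] using hpre
  | cons x r ih =>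
      intro pre hpre p hp
      by_cases hx : x = c
      · simp [parts1, hx] at hp
        rcases hp with hp | hp
        · simpa [hp] using hpre
        · exact ih [] (by simp) p hp
      · simp [parts1, hx] at hp
        exact ih (pre ++ [x]) (by simp [List.count_append, hpre, hx]) p hp

lemma hyphens_eq (w : String) : hyphens w = (w.toList.count '-' : Int) := by
  rw [hyphens]
  simpa using PySem.List.foldl_beq_add_one w.toList '-' 0

lemma split_two (w : String) (h : hyphens w = 2) :
    ∃ a b c : List Char,
      (PySem.Str.split? w "-").getD [] =
        [String.ofList a, String.ofList b, String.ofList c] ∧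
      a.count '-' = 0 ∧ b.count '-' = 0 ∧ c.count '-' = 0 := by
  have hc : w.toList.count '-' = 2 := by
    have := hyphens_eq w; rw [h] at this; exact_mod_cast this.symm
  have hsep : ("-" : String).toList = ['-'] := rfl
  have hsplit : PySem.Str.split? w "-" =
      some ((parts1 '-' [] w.toList).map String.ofList) := by
    simp [PySem.Str.split?, PySem.Chars.split?, hsep, splitOn_single]
  have hlen : (parts1 '-' [] w.toList).length = 3 := by
    rw [parts1_length]; omega
  obtain ⟨a, b, c, habc⟩ : ∃ a b c, parts1 '-' [] w.toList = [a, b, c] := by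
    match hp : parts1 '-' [] w.toList with
    | [a, b, c] => exact ⟨a, b, c, rfl⟩
    | [] | [_] | [_, _] | _ :: _ :: _ :: _ :: _ => rw [hp] at hlen; simp at hlen
  have hmem := parts1_count '-' w.toList [] (by simp)
  rw [habc] at hmem
  exact ⟨a, b, c, by simp [hsplit, habc],
    hmem a (by simp), hmem b (by simp), hmem c (by simp)⟩

-- weight of a remaining word for loopA's termination measure
lemma parts_weight (w : String) (h : hyphens w = 2) :
    ∃ a b c : List Char,
      (PySem.Str.split? w "-").getD [] =
        [String.ofList a, String.ofList b, String.ofList c] := by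
  obtain ⟨a, b, c, hp, _⟩ := split_two w h; exact ⟨a, b, c, hp⟩

-- loopA models A's inner 'for word in line' that mutates line in place while iterating:
-- acc holds (reversed) the part of the line already passed, the second argument is the part
-- of the (current, mutated) line still to be visited; a two-hyphen word is replaced by its
-- three split parts and iteration resumes at the second part, exactly as in Python.
-- parts[i] is Python line indexing that cannot go out of range (split of a two-hyphen word
-- has three parts); pyGetD with default "" is exact here.
def loopA : List String → List String → List String
  | acc, [] => acc.reverse
  | acc, word :: rest =>
    if h : hyphens word = 2 then
      let n1Word := PySem.List.pyGetD ((PySem.Str.split? word "-").getD []) 0 ""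
      let prepWord := PySem.List.pyGetD ((PySem.Str.split? word "-").getD []) 1 ""
      let n2Word := PySem.List.pyGetD ((PySem.Str.split? word "-").getD []) 2 ""
      loopA (n1Word :: acc) (prepWord :: n2Word :: rest)
    else loopA (word :: acc) rest
  termination_by _ ws => (ws.map (fun w => w.toList.count '-' + 1)).sum
  decreasing_by
  · obtain ⟨a, b, c, hp⟩ := parts_weight word h
    have hc : word.toList.count '-' = 2 := by
      have := hyphens_eq word; rw [h] at this; exact_mod_cast this.symm
    obtain ⟨a', b', c', hp', _, hb, hc'⟩ := split_two word h
    rw [hp'] at hp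
    simp [hp', PySem.List.pyGetD, PySem.List.pyGet?, PySem.List.pyIdx?, hc, hb, hc']
    omega
  · simp

def processBigDataOutOfTog (rawText : List (List String)) : List (List String) :=
  rawText.map (fun line => loopA [] line)

-- ===== PORT B =====
def splitLine (line : List String) : List String :=
  line.foldl (fun newline word =>
    if PySem.Str.count word "-" == 2 then
      newline ++ (PySem.Str.split? word "-").getD []
    else
      newline ++ [word]) []

def processBigDataOutOfTog_alt (rawText : List (List String)) : List (List String) :=
  rawText.map splitLine

-- ===== PRECONDITION & SPEC =====
def Spec_processBigDataOutOfTog (rawText : List (List String)) (out : List (List String)) : Prop := out = processBigDataOutOfTog_alt rawText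
instance (rawText : List (List String)) (out : List (List String)) : Decidable (Spec_processBigDataOutOfTog rawText out) := by unfold Spec_processBigDataOutOfTog; infer_instance

-- ===== CLAIM (what is proved, stated in full; the proofs are below) =====
def Claim_equal_processBigDataOutOfTog : Prop := ∀ (rawText : List (List String)), Dom_processBigDataOutOfTog rawText → Spec_processBigDataOutOfTog rawText (processBigDataOutOfTog rawText)

-- ===== LEMMAS AND PROOFS =====
lemma count_go_single (c : Char) : ∀ (l : List Char) (fuel acc : Nat), l.length ≤ fuel →
    PySem.Chars.count.go [c] fuel l acc = acc + l.count c := by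
  intro l
  induction l with
  | nil => intro fuel acc h; cases fuel <;> simp [PySem.Chars.count.go]
  | cons x r ih =>
      intro fuel acc h
      cases fuel with
      | zero => simp at h
      | succ f =>
          by_cases hx : x = c
          · subst hx
            simp only [PySem.Chars.count.go, List.isPrefixOf, BEq.rfl, Bool.true_and,
              if_true, List.length_cons, List.drop_succ_cons,
              List.length_nil, List.drop_zero]
            rw [ih f (acc + 1) (by simpa using h)]
            simp
            omega
          · have hpre : [c].isPrefixOf (x :: r) = false := by
              simp [List.isPrefixOf]; exact fun h' => absurd h'.symm hx
            simp only [PySem.Chars.count.go, hpre]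
            rw [ih f acc (by simpa using h)]
            simp [hx]

lemma count_single (l : List Char) (c : Char) : PySem.Chars.count l [c] = l.count c := by
  simpa [PySem.Chars.count] using count_go_single c l l.length 0 le_rfl


-- the per-word expansion both programs compute
def fWord (w : String) : List String :=
  if hyphens w = 2 then (PySem.Str.split? w "-").getD [] else [w]

lemma hyphens_ofList_count_zero {a : List Char} (h : a.count '-' = 0) :
    hyphens (String.ofList a) ≠ 2 := by
  rw [hyphens_eq]
  simp [h]

lemma fWord_of_count_zero {a : List Char} (h : a.count '-' = 0) :
    fWord (String.ofList a) = [String.ofList a] := by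
  simp [fWord, hyphens_ofList_count_zero h]

lemma loopA_eq (acc ws) : loopA acc ws = acc.reverse ++ ws.flatMap fWord := by
  induction acc, ws using loopA.induct with
  | case1 acc => simp [loopA]
  | case2 acc word rest h n1 prep n2 ih =>
      obtain ⟨a, b, c, hp, _, hb, hc⟩ := split_two word h
      rw [loopA, dif_pos h, ih]
      have hn1 : n1 = String.ofList a := by simp [n1, hp, PySem.List.pyGetD, PySem.List.pyGet?, PySem.List.pyIdx?]
      have hprep : prep = String.ofList b := by simp [prep, hp, PySem.List.pyGetD, PySem.List.pyGet?, PySem.List.pyIdx?]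
      have hn2 : n2 = String.ofList c := by simp [n2, hp, PySem.List.pyGetD, PySem.List.pyGet?, PySem.List.pyIdx?]
      have hfw : fWord word = [String.ofList a, String.ofList b, String.ofList c] := by
        rw [fWord, if_pos h, hp]
      simp [hn1, hprep, hn2, List.flatMap_cons, hfw, fWord_of_count_zero hb,
        fWord_of_count_zero hc]
  | case3 acc word rest h ih =>
      rw [loopA, dif_neg h, ih]
      simp [fWord, h]

lemma count_eq_hyphens (w : String) :
    (PySem.Str.count w "-" == 2) = decide (hyphens w = 2) := by
  have : PySem.Str.count w "-" = w.toList.count '-' := by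
    simpa using count_single w.toList '-'
  rw [hyphens_eq]
  simp only [this]
  by_cases h : w.toList.count '-' = 2
  · simp [h]
  · have h2 : ((w.toList.count '-' : Nat) : Int) ≠ 2 := by exact_mod_cast h
    simp [h, h2]

lemma splitLine_eq (line : List String) : splitLine line = line.flatMap fWord := by
  have hstep : (fun (newline : List String) word =>
      if PySem.Str.count word "-" == 2 then
        newline ++ (PySem.Str.split? word "-").getD []
      else newline ++ [word]) = fun newline word => newline ++ fWord word := by
    funext newline word
    rw [count_eq_hyphens]
    unfold fWord
    by_cases h : hyphens word = 2 <;> simp [h]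
  rw [splitLine, hstep, PySem.List.foldl_append_eq_flatMap]
  simp

-- ===== VERDICT (by name: the statement is the Claim_ definition above) =====
theorem processBigDataOutOfTog_spec : Claim_equal_processBigDataOutOfTog := by
  intro rawText _
  unfold Spec_processBigDataOutOfTog processBigDataOutOfTog processBigDataOutOfTog_alt
  refine List.map_congr_left (fun line _ => ?_)
  rw [loopA_eq, splitLine_eq]
  simp
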